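-- pv_equiv track=rewrite | github.com/wooson00308/Beluca-Pipeline | src/bpe/core/shotgrid_proxy.py | _parse_proxy_server_value
-- ===== SOURCE A (Python) =====
-- def _parse_proxy_server_value(proxy_server: str) -> str:
--     """
--     HKCU Internet Settings ProxyServer string formats:
--       host:port
--       http=host:port;https=host:port;ftp=...
--     Prefer https= then http= for ShotGrid (HTTPS).
--     """
--     s = (proxy_server or "").strip()
--     if not s:
--         return ""
--     if "=" not in s:
--         return s
--     parts = [p.strip() for p in s.split(";") if p.strip()]
--     for prefix in ("https=", "http="):
--         pl = prefix.lower()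
--         for p in parts:
--             low = p.lower()
--             if low.startswith(pl):
--                 return p.split("=", 1)[1].strip()
--     return ""
-- ===== SOURCE B (Python) =====
-- def _parse_proxy_server_value(proxy_server: str) -> str:
--     # One pass: index parts by scheme (first occurrence wins), then two lookups.
--     s = (proxy_server or "").strip()
--     if not s:
--         return ""
--     if "=" not in s:
--         return s
--     table = {}
--     for part in (q.strip() for q in s.split(";")):
--         if "=" in part:
--             scheme, value = part.split("=", 1)
--             table.setdefault(scheme.lower(), value.strip())
--     for key in ("https", "http"):
--         if key in table:
--             return table[key]
--     return ""
-- ===== Notes on version B (the rewrite author's own statement) =====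
-- stated objective: idiomatic
-- what changed: Replaces A's two nested prefix-scan passes over the parts with a single pass that builds a scheme->value dict (first occurrence wins via setdefault) followed by two direct key lookups.
import Mathlib
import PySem

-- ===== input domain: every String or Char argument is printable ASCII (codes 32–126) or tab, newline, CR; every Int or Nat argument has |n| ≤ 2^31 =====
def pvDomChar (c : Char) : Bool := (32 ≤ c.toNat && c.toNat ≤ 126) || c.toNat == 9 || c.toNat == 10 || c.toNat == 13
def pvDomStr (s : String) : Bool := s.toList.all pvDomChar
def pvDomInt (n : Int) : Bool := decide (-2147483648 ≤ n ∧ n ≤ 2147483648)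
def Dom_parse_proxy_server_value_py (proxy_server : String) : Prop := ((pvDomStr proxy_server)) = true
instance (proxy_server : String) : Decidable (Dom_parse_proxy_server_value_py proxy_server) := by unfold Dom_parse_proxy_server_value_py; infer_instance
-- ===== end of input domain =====

-- B replaces A's two nested prefix-scan passes over the proxy parts with one pass that indexes
-- parts by scheme (first occurrence wins, dict setdefault) plus two direct lookups (idiomatic).


-- ===== PORT A =====
-- inner loop of A: for p in parts: if p.lower().startswith(pl): return p.split("=", 1)[1].strip()
-- (the [1] index is only evaluated under the startswith guard, where the '=' split always has a
--  second piece, so the `.getD` defaults are never the value returned)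
def pvAScan (pl : String) : List String → Option String
  | [] => none
  | p :: rest =>
    if PySem.Str.startswith (PySem.Str.lower p) pl then
      some (PySem.Str.strip (((PySem.Str.splitMax? p "=" 1).getD []).getD 1 ""))
    else pvAScan pl rest

def parse_proxy_server_value_py (proxy_server : String) : String :=
  let s := PySem.Str.strip proxy_server
  if s = "" then ""
  else if PySem.Str.isIn "=" s = false then s
  else
    let parts := (((PySem.Str.split? s ";").getD []).map PySem.Str.strip).filter (fun p => p ≠ "")
    match pvAScan (PySem.Str.lower "https=") parts with
    | some r => r
    | none =>
      match pvAScan (PySem.Str.lower "http=") parts with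
      | some r => r
      | none => ""

-- ===== PORT B =====
-- loop body of B: if "=" in part: scheme, value = part.split("=", 1); table.setdefault(scheme.lower(), value.strip())
def pvBStep (d : PySem.Dict String String) (p : String) : PySem.Dict String String :=
  if PySem.Str.isIn "=" p then
    let pieces := (PySem.Str.splitMax? p "=" 1).getD []
    d.setdefault (PySem.Str.lower (pieces.getD 0 "")) (PySem.Str.strip (pieces.getD 1 ""))
  else d

def parse_proxy_server_value_py_alt (proxy_server : String) : String :=
  let s := PySem.Str.strip proxy_server
  if s = "" then ""
  else if PySem.Str.isIn "=" s = false then s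
  else
    let table := (((PySem.Str.split? s ";").getD []).map PySem.Str.strip).foldl pvBStep PySem.Dict.empty
    match PySem.Dict.get? table "https" with
    | some v => v
    | none =>
      match PySem.Dict.get? table "http" with
      | some v => v
      | none => ""

-- ===== PRECONDITION & SPEC =====
def Spec_parse_proxy_server_value_py (proxy_server : String) (out : String) : Prop := out = parse_proxy_server_value_py_alt proxy_server
instance (proxy_server : String) (out : String) : Decidable (Spec_parse_proxy_server_value_py proxy_server out) := by unfold Spec_parse_proxy_server_value_py; infer_instance

-- ===== CLAIM (what is proved, stated in full; the proofs are below) =====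
def Claim_equal_parse_proxy_server_value_py : Prop := ∀ (proxy_server : String), Dom_parse_proxy_server_value_py proxy_server → Spec_parse_proxy_server_value_py proxy_server (parse_proxy_server_value_py proxy_server)

-- ===== LEMMAS AND PROOFS =====

theorem pv_lowerChar_eq (c : Char) : PySem.Chars.lowerChar c = '=' ↔ c = '=' := by
  unfold PySem.Chars.lowerChar
  split
  · next h =>
    simp [PySem.Chars.isupper] at h
    constructor
    · intro he
      exfalso
      have h65 : 65 ≤ c.toNat := by
        have := h.1; simpa [Char.le_def] using this
      have h90 : c.toNat ≤ 90 := by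
        have := h.2; simpa [Char.le_def] using this
      have hv : (c.toNat + 32).isValidChar := Or.inl (by omega)
      have ht : (Char.ofNat (c.toNat + 32)).toNat = c.toNat + 32 := by
        rw [Char.toNat_ofNat, if_pos hv]
      rw [he] at ht
      rw [show ('=' : Char).toNat = 61 from rfl] at ht
      omega
    · intro he
      rw [he] at h
      exact absurd h (by decide)
  · exact Iff.rfl

theorem pv_mem_lower (cs : List Char) : '=' ∈ PySem.Chars.lower cs ↔ '=' ∈ cs := by
  simp only [PySem.Chars.lower, List.mem_map]
  constructor
  · rintro ⟨c, hc, he⟩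
    rwa [(pv_lowerChar_eq c).mp he] at hc
  · intro h
    exact ⟨'=', h, by decide⟩

theorem pv_isIn_mem (cs : List Char) : PySem.Chars.isIn ['='] cs = true ↔ '=' ∈ cs := by
  rw [PySem.Chars.isIn_iff_infix]
  constructor
  · intro h
    exact h.subset (by simp)
  · intro h
    obtain ⟨s, t, rfl⟩ := List.append_of_mem h
    exact ⟨s, t, by simp⟩

theorem pv_decomp {cs : List Char} (h : '=' ∈ cs) :
    ∃ a b, '=' ∉ a ∧ cs = a ++ '=' :: b := by
  induction cs with
  | nil => simp at h
  | cons c rest ih =>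
    by_cases hc : c = '='
    · exact ⟨[], rest, by simp, by simp [hc]⟩
    · have hr : '=' ∈ rest := by
        rcases List.mem_cons.mp h with h1 | h1
        · exact absurd h1.symm hc
        · exact h1
      obtain ⟨a, b, ha, hab⟩ := ih hr
      exact ⟨c :: a, b, by simp [ha]; exact fun h1 => hc h1.symm, by simp [hab]⟩

theorem pv_go_m0 (fuel : Nat) (hf : 0 < fuel) (l cur : List Char) (acc : List (List Char)) :
    PySem.Chars.splitOnMax.go ['='] fuel 0 l cur acc = ((cur.reverse ++ l) :: acc).reverse := by
  cases fuel with
  | zero => omega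
  | succ f =>
    cases l with
    | nil => simp [PySem.Chars.splitOnMax.go]
    | cons c rest => simp [PySem.Chars.splitOnMax.go]

theorem pv_go_m1 : ∀ (a : List Char), '=' ∉ a → ∀ (fuel : Nat), a.length + 2 ≤ fuel →
    ∀ (b cur : List Char) (acc : List (List Char)),
    PySem.Chars.splitOnMax.go ['='] fuel 1 (a ++ '=' :: b) cur acc =
      (b :: (cur.reverse ++ a) :: acc).reverse := by
  intro a
  induction a with
  | nil =>
    intro _ fuel hf b cur acc
    cases fuel with
    | zero => omega
    | succ f =>
      simp [PySem.Chars.splitOnMax.go, pv_go_m0 f (by omega)]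
  | cons c a' ih =>
    intro ha fuel hf b cur acc
    cases fuel with
    | zero => omega
    | succ f =>
      have hc : c ≠ '=' := fun h => ha (by simp [h])
      have ha' : '=' ∉ a' := fun h => ha (by simp [h])
      have hstep : PySem.Chars.splitOnMax.go ['='] (f + 1) 1 ((c :: a') ++ '=' :: b) cur acc =
          PySem.Chars.splitOnMax.go ['='] f 1 (a' ++ '=' :: b) (c :: cur) acc := by
        simp [PySem.Chars.splitOnMax.go, List.isPrefixOf, Ne.symm hc]
      rw [hstep, ih ha' f (by simp at hf ⊢; omega) b (c :: cur) acc]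
      simp

theorem pv_split (a b : List Char) (ha : '=' ∉ a) :
    PySem.Chars.splitOnMax (a ++ '=' :: b) ['='] 1 = [a, b] := by
  unfold PySem.Chars.splitOnMax
  rw [if_neg (by norm_num)]
  rw [show ((1 : Int)).toNat = 1 from rfl]
  rw [pv_go_m1 a ha _ (by simp) b [] []]
  simp

theorem pv_pieces (p : String) (a b : List Char) (ha : '=' ∉ a) (hp : p.toList = a ++ '=' :: b) :
    (PySem.Str.splitMax? p "=" 1).getD [] = [String.ofList a, String.ofList b] := by
  simp [PySem.Str.splitMax?, PySem.Chars.splitMax?, hp]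
  rw [pv_split a b ha]
  simp

theorem pv_prefix (x : List Char) (hx : '=' ∉ x) :
    ∀ (y : List Char), '=' ∉ y → ∀ (z : List Char),
    ((x ++ ['=']) <+: (y ++ '=' :: z) ↔ x = y) := by
  induction x with
  | nil =>
    intro y hy z
    cases y with
    | nil => simp
    | cons d y' =>
      have hd : d ≠ '=' := fun h => hy (by simp [h])
      simp [List.cons_prefix_cons, Ne.symm hd]
  | cons c x' ih =>
    intro y hy z
    have hc : c ≠ '=' := fun h => hx (by simp [h])
    have hx' : '=' ∉ x' := fun h => hx (by simp [h])
    cases y with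
    | nil => simp [List.cons_prefix_cons, hc]
    | cons d y' =>
      have hy' : '=' ∉ y' := fun h => hy (by simp [h])
      simp [List.cons_prefix_cons, ih hx' y' hy' z]

theorem pv_lower_append (a b : List Char) :
    PySem.Chars.lower (a ++ '=' :: b) = PySem.Chars.lower a ++ '=' :: PySem.Chars.lower b := by
  simp [PySem.Chars.lower, show PySem.Chars.lowerChar '=' = '=' from by decide]

theorem pv_match_iff (k p : String) (hk : '=' ∉ k.toList) (a b : List Char)
    (ha : '=' ∉ a) (hp : p.toList = a ++ '=' :: b) :
    (PySem.Chars.startswith (PySem.Chars.lower p.toList) (k.toList ++ ['=']) = true ↔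
      PySem.Str.lower (String.ofList a) = k) := by
  have hla : '=' ∉ PySem.Chars.lower a := fun h => ha ((pv_mem_lower a).mp h)
  unfold PySem.Chars.startswith
  rw [List.isPrefixOf_iff_prefix, hp, pv_lower_append]
  rw [pv_prefix k.toList hk (PySem.Chars.lower a) hla (PySem.Chars.lower b)]
  have hb : (PySem.Str.lower (String.ofList a)).toList = PySem.Chars.lower a := by simp
  constructor
  · intro h
    exact String.toList_inj.mp (by rw [hb, ← h])
  · intro h
    rw [← hb, h]

theorem pv_nomatch (k p : String) (h : PySem.Chars.isIn ['='] p.toList = false) :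
    PySem.Chars.startswith (PySem.Chars.lower p.toList) (k.toList ++ ['=']) = false := by
  have hmem : '=' ∉ p.toList := by
    intro hm
    rw [(pv_isIn_mem _).mpr hm] at h
    simp at h
  cases hx : PySem.Chars.startswith (PySem.Chars.lower p.toList) (k.toList ++ ['=']) with
  | false => rfl
  | true =>
    exfalso
    unfold PySem.Chars.startswith at hx
    have hpre := List.isPrefixOf_iff_prefix.mp hx
    have : '=' ∈ PySem.Chars.lower p.toList := hpre.subset (by simp)
    exact hmem ((pv_mem_lower _).mp this)

theorem pv_get_empty (k : String) :
    PySem.Dict.get? (PySem.Dict.empty : PySem.Dict String String) k = none := by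
  simp [PySem.Dict.get?, PySem.Dict.empty]

theorem pv_L1 (k : String) (hk : '=' ∉ k.toList) :
    ∀ (parts : List String) (d : PySem.Dict String String),
    PySem.Dict.get? (parts.foldl pvBStep d) k =
      (PySem.Dict.get? d k).or (pvAScan (k ++ "=") parts) := by
  intro parts
  induction parts with
  | nil =>
    intro d
    cases h : PySem.Dict.get? d k <;> simp [pvAScan, h]
  | cons p rest ih =>
    intro d
    by_cases hin : PySem.Chars.isIn ['='] p.toList = true
    · have hmem : '=' ∈ p.toList := (pv_isIn_mem _).mp hin
      obtain ⟨a, b, ha, hab⟩ := pv_decomp hmem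
      have hpieces := pv_pieces p a b ha hab
      have hstep : pvBStep d p =
          d.setdefault (PySem.Str.lower (String.ofList a)) (PySem.Str.strip (String.ofList b)) := by
        simp [pvBStep, hin, hpieces]
      by_cases hkey : PySem.Str.lower (String.ofList a) = k
      · have hsw := (pv_match_iff k p hk a b ha hab).mpr hkey
        have hscan : pvAScan (k ++ "=") (p :: rest) =
            some (PySem.Str.strip (String.ofList b)) := by
          simp [pvAScan, hsw, hpieces]
        rw [List.foldl_cons, hstep, hkey, ih, PySem.Dict.get?_setdefault_self, hscan]
        cases PySem.Dict.get? d k <;> simp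
      · have hsw : PySem.Chars.startswith (PySem.Chars.lower p.toList) (k.toList ++ ['=']) = false := by
          cases hx : PySem.Chars.startswith (PySem.Chars.lower p.toList) (k.toList ++ ['=']) with
          | true => exact absurd ((pv_match_iff k p hk a b ha hab).mp hx) hkey
          | false => rfl
        have hscan : pvAScan (k ++ "=") (p :: rest) = pvAScan (k ++ "=") rest := by
          simp [pvAScan, hsw]
        rw [List.foldl_cons, hstep, ih,
          PySem.Dict.get?_setdefault_of_ne d (PySem.Str.strip (String.ofList b)) (Ne.symm hkey),
          hscan]
    · have hin' : PySem.Chars.isIn ['='] p.toList = false := by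
        cases hx : PySem.Chars.isIn ['='] p.toList with
        | true => exact absurd hx hin
        | false => rfl
      have hstep : pvBStep d p = d := by simp [pvBStep, hin']
      have hscan : pvAScan (k ++ "=") (p :: rest) = pvAScan (k ++ "=") rest := by
        simp [pvAScan, pv_nomatch k p hin']
      rw [List.foldl_cons, hstep, ih, hscan]

theorem pv_scan_filter (pl : String)
    (h : PySem.Chars.startswith (PySem.Chars.lower []) pl.toList = false)
    (l : List String) :
    pvAScan pl (l.filter (fun p => p ≠ "")) = pvAScan pl l := by
  induction l with
  | nil => rfl
  | cons p rest ih =>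
    by_cases hp : p = ""
    · subst hp
      have h1 : ("" :: rest).filter (fun p => p ≠ "") = rest.filter (fun p => p ≠ "") := by simp
      have h2 : pvAScan pl ("" :: rest) = pvAScan pl rest := by simp [pvAScan, h]
      rw [h1, ih, h2]
    · have h1 : (p :: rest).filter (fun p => p ≠ "") = p :: rest.filter (fun p => p ≠ "") := by
        simp [hp]
      rw [h1]
      cases hx : PySem.Chars.startswith (PySem.Chars.lower p.toList) pl.toList with
      | true => simp [pvAScan, hx]
      | false =>
        simp [pvAScan, hx]
        simpa using ih

-- ===== VERDICT (by name: the statement is the Claim_ definition above) =====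
theorem parse_proxy_server_value_py_spec : Claim_equal_parse_proxy_server_value_py := by
  intro proxy _
  unfold Spec_parse_proxy_server_value_py
  simp only [parse_proxy_server_value_py, parse_proxy_server_value_py_alt]
  by_cases h0 : PySem.Str.strip proxy = ""
  · rw [if_pos h0, if_pos h0]
  · rw [if_neg h0, if_neg h0]
    by_cases h1 : PySem.Str.isIn "=" (PySem.Str.strip proxy) = false
    · rw [if_pos h1, if_pos h1]
    · rw [if_neg h1, if_neg h1]
      have hA1 : pvAScan (PySem.Str.lower "https=")
            ((((PySem.Str.split? (PySem.Str.strip proxy) ";").getD []).map PySem.Str.strip).filter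
              (fun p => p ≠ "")) =
          pvAScan ("https" ++ "=")
            (((PySem.Str.split? (PySem.Str.strip proxy) ";").getD []).map PySem.Str.strip) := by
        rw [show PySem.Str.lower "https=" = "https" ++ "=" from by decide]
        exact pv_scan_filter _ (by decide) _
      have hA2 : pvAScan (PySem.Str.lower "http=")
            ((((PySem.Str.split? (PySem.Str.strip proxy) ";").getD []).map PySem.Str.strip).filter
              (fun p => p ≠ "")) =
          pvAScan ("http" ++ "=")
            (((PySem.Str.split? (PySem.Str.strip proxy) ";").getD []).map PySem.Str.strip) := by
        rw [show PySem.Str.lower "http=" = "http" ++ "=" from by decide]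
        exact pv_scan_filter _ (by decide) _
      have hB1 : PySem.Dict.get?
            ((((PySem.Str.split? (PySem.Str.strip proxy) ";").getD []).map PySem.Str.strip).foldl
              pvBStep PySem.Dict.empty) "https" =
          pvAScan ("https" ++ "=")
            (((PySem.Str.split? (PySem.Str.strip proxy) ";").getD []).map PySem.Str.strip) := by
        rw [pv_L1 "https" (by decide) _ PySem.Dict.empty, pv_get_empty]
        simp
      have hB2 : PySem.Dict.get?
            ((((PySem.Str.split? (PySem.Str.strip proxy) ";").getD []).map PySem.Str.strip).foldl
              pvBStep PySem.Dict.empty) "http" =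
          pvAScan ("http" ++ "=")
            (((PySem.Str.split? (PySem.Str.strip proxy) ";").getD []).map PySem.Str.strip) := by
        rw [pv_L1 "http" (by decide) _ PySem.Dict.empty, pv_get_empty]
        simp
      rw [hA1, hA2, hB1, hB2]
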